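-- pv_equiv track=rewrite | github.com/Capstone-C242-PS367/finku-ml-api | src/utils.py | sort_bounding_boxes_with_tolerance
-- ===== SOURCE A (Python) =====
-- def sort_bounding_boxes_with_tolerance(boxes, y_tolerance=5):
--     """
--     Sort bounding boxes primarily by y-coordinate and secondarily by x-coordinate,
--     allowing a small tolerance for misalignments in the vertical position (y).
--     """
--     # First, sort the bounding boxes by y-coordinate and x-coordinate
--     sorted_boxes = sorted(boxes, key=lambda b: (b[1], b[0]))
--
--     # List to store the final sorted boxes with adjustments for y tolerance
--     sorted_boxes_adjusted = []
--
--     last_y = None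
--     line = []  # Temporary list to hold boxes in the same y-line
--     for (x, y, w, h) in sorted_boxes:
--         if last_y is None or abs(last_y - y) <= y_tolerance:
--             # Add character to current line group
--             line.append((x, y, w, h))
--         else:
--             # Sort characters in the same line by x position
--             line_sorted = sorted(line, key=lambda b: b[0])
--             sorted_boxes_adjusted.extend(line_sorted)  # Add sorted line to final list
--             line = [(x, y, w, h)]  # Start a new line
--
--         last_y = y  # Update the last y position
--
--     # After the loop, sort and add the last line of characters
--     if line:
--         line_sorted = sorted(line, key=lambda b: b[0])
--         sorted_boxes_adjusted.extend(line_sorted)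
--
--     return sorted_boxes_adjusted
-- ===== SOURCE B (Python) =====
-- def sort_bounding_boxes_with_tolerance(boxes, y_tolerance=5):
--     """
--     Sort bounding boxes by y then x with tolerance: tag each box with a running
--     line index in one pass over the (y, x)-presorted boxes, then do a single
--     stable sort by (line index, x) instead of sorting each line group separately.
--     """
--     pre = sorted(boxes, key=lambda b: (b[1], b[0]))
--     pairs = []
--     line = 0
--     last_y = None
--     for b in pre:
--         if last_y is not None and abs(last_y - b[1]) > y_tolerance:
--             line += 1
--         pairs.append((line, b))
--         last_y = b[1]
--     return [b for (_, b) in sorted(pairs, key=lambda t: (t[0], t[1][0]))]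
-- ===== Notes on version B (the rewrite author's own statement) =====
-- stated objective: alternative
-- what changed: A materializes per-line groups after the (y,x) presort and stably sorts each group by x, flushing group by group; B instead tags each presorted box with a running line index in one pass and performs a single stable sort by (line index, x), relying on sort stability for ties.
import Mathlib
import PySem

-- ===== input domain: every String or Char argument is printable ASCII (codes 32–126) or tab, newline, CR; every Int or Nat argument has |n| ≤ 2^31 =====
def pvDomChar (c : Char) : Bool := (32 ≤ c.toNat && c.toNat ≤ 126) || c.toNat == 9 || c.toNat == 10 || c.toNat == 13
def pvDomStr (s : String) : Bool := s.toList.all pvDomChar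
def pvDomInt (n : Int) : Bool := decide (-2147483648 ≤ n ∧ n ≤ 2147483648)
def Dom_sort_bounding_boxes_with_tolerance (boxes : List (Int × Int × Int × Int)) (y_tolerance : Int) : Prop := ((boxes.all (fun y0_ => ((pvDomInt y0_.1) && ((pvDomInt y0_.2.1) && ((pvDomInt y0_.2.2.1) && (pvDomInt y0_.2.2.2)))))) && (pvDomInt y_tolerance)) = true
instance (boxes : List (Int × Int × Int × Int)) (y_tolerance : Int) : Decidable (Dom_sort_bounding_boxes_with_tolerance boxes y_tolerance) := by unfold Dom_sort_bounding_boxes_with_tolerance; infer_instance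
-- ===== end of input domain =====

-- B tags each presorted box with a running line index and does ONE stable sort by
-- (line index, x), instead of A's per-line grouping with a stable sort per group (alternative decomposition, same cost).


-- ===== PORT A =====
-- one iteration of A's loop; state = (sorted_boxes_adjusted, last_y, line)
def pvStepA (y_tolerance : Int)
    (s : List (Int × Int × Int × Int) × Option Int × List (Int × Int × Int × Int))
    (b : Int × Int × Int × Int) :
    List (Int × Int × Int × Int) × Option Int × List (Int × Int × Int × Int) :=
  match s with
  | (adj, last_y, line) =>
    match last_y with
    | none => (adj, some b.2.1, line ++ [b])
    | some ly =>
      if |ly - b.2.1| ≤ y_tolerance then (adj, some b.2.1, line ++ [b])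
      else (adj ++ PySem.List.sorted line (fun c => c.1), some b.2.1, [b])

def sort_bounding_boxes_with_tolerance (boxes : List (Int × Int × Int × Int)) (y_tolerance : Int) : List (Int × Int × Int × Int) :=
  let sorted_boxes := PySem.List.sorted2 boxes (fun b => b.2.1) (fun b => b.1)
  let st := sorted_boxes.foldl (pvStepA y_tolerance) ([], none, [])
  if st.2.2 = [] then st.1 else st.1 ++ PySem.List.sorted st.2.2 (fun c => c.1)

-- ===== PORT B =====
-- one iteration of B's tagging loop; state = (pairs, line, last_y)
def pvStepB (y_tolerance : Int)
    (s : List (Int × (Int × Int × Int × Int)) × Int × Option Int)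
    (b : Int × Int × Int × Int) :
    List (Int × (Int × Int × Int × Int)) × Int × Option Int :=
  match s with
  | (pairs, line, last_y) =>
    let line' := match last_y with
      | some ly => if y_tolerance < |ly - b.2.1| then line + 1 else line
      | none => line
    (pairs ++ [(line', b)], line', some b.2.1)

def sort_bounding_boxes_with_tolerance_alt (boxes : List (Int × Int × Int × Int)) (y_tolerance : Int) : List (Int × Int × Int × Int) :=
  let pre := PySem.List.sorted2 boxes (fun b => b.2.1) (fun b => b.1)
  let st := pre.foldl (pvStepB y_tolerance) ([], 0, none)
  (PySem.List.sorted2 st.1 (fun t => t.1) (fun t => t.2.1)).map (fun t => t.2)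

-- ===== PRECONDITION & SPEC =====
def Spec_sort_bounding_boxes_with_tolerance (boxes : List (Int × Int × Int × Int)) (y_tolerance : Int) (out : List (Int × Int × Int × Int)) : Prop := out = sort_bounding_boxes_with_tolerance_alt boxes y_tolerance
instance (boxes : List (Int × Int × Int × Int)) (y_tolerance : Int) (out : List (Int × Int × Int × Int)) : Decidable (Spec_sort_bounding_boxes_with_tolerance boxes y_tolerance out) := by unfold Spec_sort_bounding_boxes_with_tolerance; infer_instance

-- ===== CLAIM (what is proved, stated in full; the proofs are below) =====
def Claim_equal_sort_bounding_boxes_with_tolerance : Prop := ∀ (boxes : List (Int × Int × Int × Int)) (y_tolerance : Int), Dom_sort_bounding_boxes_with_tolerance boxes y_tolerance → Spec_sort_bounding_boxes_with_tolerance boxes y_tolerance (sort_bounding_boxes_with_tolerance boxes y_tolerance)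

-- ===== LEMMAS AND PROOFS =====

-- A's tail computation from a mid-loop state: remaining boxes, current line, last_y
def pvAH (tol : Int) : List (Int × Int × Int × Int) → List (Int × Int × Int × Int) → Int → List (Int × Int × Int × Int)
  | [], line, _ => PySem.List.sorted line (fun c => c.1)
  | b :: r, line, ly =>
    if |ly - b.2.1| ≤ tol then pvAH tol r (line ++ [b]) b.2.1
    else PySem.List.sorted line (fun c => c.1) ++ pvAH tol r [b] b.2.1

-- B's tail tagging from a mid-loop state: remaining boxes, current line index, last_y
def pvBT (tol : Int) : List (Int × Int × Int × Int) → Int → Int → List (Int × (Int × Int × Int × Int))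
  | [], _, _ => []
  | b :: r, k, ly =>
    let k' := if tol < |ly - b.2.1| then k + 1 else k
    (k', b) :: pvBT tol r k' b.2.1

theorem pvBT_tag_ge (tol : Int) (xs : List (Int × Int × Int × Int)) (k ly : Int) :
    ∀ t ∈ pvBT tol xs k ly, k ≤ t.1 := by
  induction xs generalizing k ly with
  | nil => simp [pvBT]
  | cons b r ih =>
    intro t ht
    by_cases hc : tol < |ly - b.2.1|
    · simp only [pvBT, if_pos hc, List.mem_cons] at ht
      rcases ht with h | h
      · rw [h]; simp
      · have := ih (k + 1) b.2.1 t h; omega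
    · simp only [pvBT, if_neg hc, List.mem_cons] at ht
      rcases ht with h | h
      · rw [h]
      · exact ih k b.2.1 t h

theorem pv_insertBy_append {α : Type} (before : α → α → Bool) (x : α) (P Q : List α)
    (h : ∀ p ∈ P, before x p = false) :
    PySem.List.insertBy before x (P ++ Q) = P ++ PySem.List.insertBy before x Q := by
  induction P with
  | nil => rfl
  | cons p P ih =>
    simp only [List.cons_append, PySem.List.insertBy, h p (by simp)]
    rw [ih (fun q hq => h q (by simp [hq]))]
    simp

theorem pv_foldl_insertBy_prefix {α : Type} (before : α → α → Bool) (P : List α)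
    (Q : List α) (acc : List α) (h : ∀ x ∈ Q, ∀ p ∈ P, before x p = false) :
    Q.foldl (fun acc x => PySem.List.insertBy before x acc) (P ++ acc) =
      P ++ Q.foldl (fun acc x => PySem.List.insertBy before x acc) acc := by
  induction Q generalizing acc with
  | nil => rfl
  | cons q Q ih =>
    simp only [List.foldl_cons]
    rw [pv_insertBy_append before q P acc (fun p hp => h q (by simp) p hp)]
    exact ih _ (fun x hx p hp => h x (by simp [hx]) p hp)

-- stable tuple-key sort splits over an append when the first keys are separated
theorem pv_sorted2_append (P Q : List (Int × (Int × Int × Int × Int)))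
    (h : ∀ p ∈ P, ∀ q ∈ Q, p.1 < q.1) :
    PySem.List.sorted2 (P ++ Q) (fun t => t.1) (fun t => t.2.1) =
      PySem.List.sorted2 P (fun t => t.1) (fun t => t.2.1) ++
      PySem.List.sorted2 Q (fun t => t.1) (fun t => t.2.1) := by
  show List.foldl _ [] (P ++ Q) = _
  rw [List.foldl_append]
  have hP : ∀ x ∈ PySem.List.sorted2 P (fun t => t.1) (fun t => t.2.1), x ∈ P := by
    intro x hx
    exact (PySem.List.sorted2_perm P (fun t => t.1) (fun t => t.2.1) false).mem_iff.mp hx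
  have := pv_foldl_insertBy_prefix
    (fun a b => decide (a.1 < b.1) || !decide (b.1 < a.1) && decide (a.2.1 < b.2.1))
    (PySem.List.sorted2 P (fun t => t.1) (fun t => t.2.1)) Q []
    (by
      intro x hx p hp
      have hlt := h p (hP p hp) x hx
      simp only [Bool.or_eq_false_iff, Bool.and_eq_false_iff]
      constructor
      · simp; omega
      · left; simp; omega)
  simpa using this

-- insertion sort commutes with tagging every element by the same line index
theorem pv_insertBy_map_tag (k : Int) (x : Int × Int × Int × Int)
    (ys : List (Int × Int × Int × Int)) :
    PySem.List.insertBy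
        (fun a b => decide (a.1 < b.1) || !decide (b.1 < a.1) && decide (a.2.1 < b.2.1))
        (k, x) (ys.map (fun b => (k, b))) =
      (PySem.List.insertBy (fun a b => decide (a.1 < b.1)) x ys).map (fun b => (k, b)) := by
  induction ys with
  | nil => rfl
  | cons y ys ih =>
    simp only [List.map_cons, PySem.List.insertBy]
    have : (decide (k < k) || !decide (k < k) && decide (x.1 < y.1)) = decide (x.1 < y.1) := by
      simp
    rw [this]
    split <;> simp [ih]

theorem pv_sorted2_map_tag (k : Int) (line : List (Int × Int × Int × Int)) :
    PySem.List.sorted2 (line.map (fun b => (k, b))) (fun t => t.1) (fun t => t.2.1) =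
      (PySem.List.sorted line (fun c => c.1)).map (fun b => (k, b)) := by
  show List.foldl _ [] _ = _
  rw [PySem.List.sorted_eq_foldl_insertBy]
  have : ∀ acc : List (Int × Int × Int × Int),
      (line.map (fun b => (k, b))).foldl
          (fun acc x => PySem.List.insertBy
            (fun a b => decide (a.1 < b.1) || !decide (b.1 < a.1) && decide (a.2.1 < b.2.1)) x acc)
          (acc.map (fun b => (k, b))) =
        (line.foldl (fun acc x => PySem.List.insertBy (fun a b => decide (a.1 < b.1)) x acc) acc).map
          (fun b => (k, b)) := by
    induction line with
    | nil => intro acc; rfl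
    | cons b r ih =>
      intro acc
      simp only [List.map_cons, List.foldl_cons]
      rw [pv_insertBy_map_tag k b acc, ih]
  simpa using this []

-- main invariant: A's tail equals B's sort of (current line tagged k) ++ tagged tail
theorem pv_main (tol : Int) (xs : List (Int × Int × Int × Int)) :
    ∀ (line : List (Int × Int × Int × Int)) (ly k : Int),
    pvAH tol xs line ly =
      (PySem.List.sorted2 (line.map (fun b => (k, b)) ++ pvBT tol xs k ly)
        (fun t => t.1) (fun t => t.2.1)).map (fun t => t.2) := by
  induction xs with
  | nil =>
    intro line ly k
    simp only [pvAH, pvBT, List.append_nil, pv_sorted2_map_tag, List.map_map]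
    simp
  | cons b r ih =>
    intro line ly k
    simp only [pvAH, pvBT]
    by_cases hle : |ly - b.2.1| ≤ tol
    · have hnot : ¬ tol < |ly - b.2.1| := not_lt.mpr hle
      rw [if_pos hle, if_neg hnot]
      have heq : line.map (fun b => (k, b)) ++ (k, b) :: pvBT tol r k b.2.1 =
          (line ++ [b]).map (fun b => (k, b)) ++ pvBT tol r k b.2.1 := by
        simp
      rw [heq]
      exact ih (line ++ [b]) b.2.1 k
    · have hlt : tol < |ly - b.2.1| := by omega
      rw [if_neg hle, if_pos hlt]
      have hsplit : PySem.List.sorted2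
          (line.map (fun b => (k, b)) ++ ((k + 1, b) :: pvBT tol r (k + 1) b.2.1))
          (fun t => t.1) (fun t => t.2.1) =
          PySem.List.sorted2 (line.map (fun b => (k, b))) (fun t => t.1) (fun t => t.2.1) ++
          PySem.List.sorted2 ((k + 1, b) :: pvBT tol r (k + 1) b.2.1) (fun t => t.1) (fun t => t.2.1) := by
        apply pv_sorted2_append
        intro p hp q hq
        have hpk : p.1 = k := by
          rcases List.mem_map.mp hp with ⟨c, _, hc⟩
          rw [← hc]
        rcases List.mem_cons.mp hq with h | h
        · rw [hpk, h]; omega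
        · have := pvBT_tag_ge tol r (k + 1) b.2.1 q h
          omega
      rw [hsplit, List.map_append, pv_sorted2_map_tag, List.map_map]
      have : ((k + 1, b) :: pvBT tol r (k + 1) b.2.1) =
          [b].map (fun c => ((k : Int) + 1, c)) ++ pvBT tol r (k + 1) b.2.1 := by simp
      rw [this, ← ih [b] b.2.1 (k + 1)]
      simp

-- A's loop from a mid-loop state computes adj ++ pvAH
theorem pv_loopA (tol : Int) (xs : List (Int × Int × Int × Int)) :
    ∀ (adj line : List (Int × Int × Int × Int)) (ly : Int),
    (let st := xs.foldl (pvStepA tol) (adj, some ly, line)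
     if st.2.2 = [] then st.1 else st.1 ++ PySem.List.sorted st.2.2 (fun c => c.1)) =
      adj ++ pvAH tol xs line ly := by
  induction xs with
  | nil =>
    intro adj line ly
    by_cases h : line = []
    · subst h; simp [pvAH, PySem.List.sorted]
    · simp only [List.foldl_nil, pvAH]
      rw [if_neg h]
  | cons b r ih =>
    intro adj line ly
    simp only [List.foldl_cons, pvStepA, pvAH]
    by_cases hle : |ly - b.2.1| ≤ tol
    · rw [if_pos hle, if_pos hle]
      exact ih adj (line ++ [b]) b.2.1
    · rw [if_neg hle, if_neg hle]
      rw [ih (adj ++ PySem.List.sorted line (fun c => c.1)) [b] b.2.1]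
      simp

-- B's loop from a mid-loop state appends pvBT to pairs
theorem pv_loopB (tol : Int) (xs : List (Int × Int × Int × Int)) :
    ∀ (pairs : List (Int × (Int × Int × Int × Int))) (k ly : Int),
    (xs.foldl (pvStepB tol) (pairs, k, some ly)).1 = pairs ++ pvBT tol xs k ly := by
  induction xs with
  | nil => intro pairs k ly; simp [pvBT]
  | cons b r ih =>
    intro pairs k ly
    simp only [List.foldl_cons, pvStepB, pvBT]
    by_cases h : tol < |ly - b.2.1|
    · rw [if_pos h]
      rw [ih (pairs ++ [(k + 1, b)]) (k + 1) b.2.1]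
      simp
    · rw [if_neg h]
      rw [ih (pairs ++ [(k, b)]) k b.2.1]
      simp

-- ===== VERDICT (by name: the statement is the Claim_ definition above) =====
theorem sort_bounding_boxes_with_tolerance_spec : Claim_equal_sort_bounding_boxes_with_tolerance := by
  intro boxes tol _
  unfold Spec_sort_bounding_boxes_with_tolerance
  unfold sort_bounding_boxes_with_tolerance sort_bounding_boxes_with_tolerance_alt
  cases hS : PySem.List.sorted2 boxes (fun b => b.2.1) (fun b => b.1) with
  | nil => rfl
  | cons b rest =>
    simp only [List.foldl_cons]
    have hA1 : pvStepA tol ([], none, []) b = ([], some b.2.1, [b]) := by rfl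
    have hB1 : pvStepB tol ([], 0, none) b = ([(0, b)], 0, some b.2.1) := by rfl
    rw [hA1, hB1]
    rw [pv_loopB tol rest [(0, b)] 0 b.2.1]
    have hA := pv_loopA tol rest [] [b] b.2.1
    simp only [List.nil_append] at hA
    rw [hA]
    have : ([(0, b)] : List (Int × (Int × Int × Int × Int))) ++ pvBT tol rest 0 b.2.1 =
        ([b].map (fun c => ((0 : Int), c))) ++ pvBT tol rest 0 b.2.1 := by simp
    rw [this, ← pv_main tol rest [b] b.2.1 0]
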